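-- pv_equiv track=rewrite | github.com/gabekanegae/advent-of-code-2019 | day17.py | replaceSub
-- ===== SOURCE A (Python) =====
-- def replaceSub(l, f, r):
--     nl = []
--     i = 0
--     while i < len(l):
--         if l[i:i+len(f)] == f:
--             nl.append("ABC"[r])
--             i += len(f)
--         else:
--             nl.append(l[i])
--             i += 1
--     return nl
-- ===== SOURCE B (Python) =====
-- def replaceSub(l, f, r):
--     # Find-based scan: jump straight to the next candidate position with
--     # list.index (C-level search for f[0]), copy unmatched chunks wholesale.
--     out = []
--     i = 0   # start of the pending unmatched chunk
--     s = 0   # search position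
--     m = len(f)
--     while True:
--         try:
--             j = l.index(f[0], s)
--         except ValueError:
--             out.extend(l[i:])
--             return out
--         if l[j:j+m] == f:
--             out.extend(l[i:j])
--             out.append("ABC"[r])
--             i = j + m
--             s = i
--         else:
--             s = j + 1
-- ===== Notes on version B (the rewrite author's own statement) =====
-- stated objective: faster
-- what changed: A checks every position with a slice compare and appends elements one by one; B jumps to the next candidate position with list.index (C-level search for f[0]) and copies unmatched chunks wholesale with slices.
-- outside the precondition, e.g. on replaceSub([], [], 0): A returns [], B raises IndexError
import Mathlib
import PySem

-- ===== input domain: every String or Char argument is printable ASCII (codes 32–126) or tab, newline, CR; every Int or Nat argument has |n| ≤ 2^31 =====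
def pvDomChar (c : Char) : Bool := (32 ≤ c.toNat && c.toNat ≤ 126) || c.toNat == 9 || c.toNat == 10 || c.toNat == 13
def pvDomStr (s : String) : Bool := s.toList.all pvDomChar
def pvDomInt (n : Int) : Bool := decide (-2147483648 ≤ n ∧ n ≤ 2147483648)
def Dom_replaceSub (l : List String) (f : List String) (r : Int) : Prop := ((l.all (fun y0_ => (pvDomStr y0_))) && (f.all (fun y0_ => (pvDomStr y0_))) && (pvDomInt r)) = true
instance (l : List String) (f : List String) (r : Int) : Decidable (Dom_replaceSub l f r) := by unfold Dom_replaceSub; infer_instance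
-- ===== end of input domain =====

-- B replaces A's element-at-a-time scan by a find-next-candidate loop that copies
-- unmatched chunks wholesale (constant-factor mechanism in Python: C-level list.index);
-- return values proved equal on Pre_ (f nonempty; r a valid index of "ABC" whenever f occurs in l).

-- ===== PORT A =====
-- "ABC"[r] (a 1-character string in Python); none = IndexError
def replaceSubTok (r : Int) : Option String :=
  (PySem.Str.pyGet? "ABC" r).map (fun c => String.ofList [c])

-- the while loop of A; i is the cursor.  Python diverges when f = [] (the matched
-- slice is empty and i never advances): that case is excluded by Pre_; the port
-- advances by max f.length 1 purely for termination, which is f.length whenever f ≠ [].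
def replaceSubGo (l f : List String) (r : Int) (i : Nat) : List String :=
  if h : i < l.length then
    if PySem.List.slice l (some (i : Int)) (some ((i : Int) + (f.length : Int))) = f then
      match replaceSubTok r with
      | some t => t :: replaceSubGo l f r (i + max f.length 1)
      | none => []                      -- IndexError in Python (excluded by Pre_)
    else
      l.getD i "" :: replaceSubGo l f r (i + 1)   -- l[i], in range since i < len l
  else []
termination_by l.length - i
decreasing_by all_goals omega

def replaceSub (l : List String) (f : List String) (r : Int) : List String :=
  replaceSubGo l f r 0

-- ===== PORT B =====
-- port of l.index(x, s): first j ≥ s with l[j] = x; none = ValueError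
def replaceSubIndexFrom (l : List String) (x : String) (s : Nat) : Option Nat :=
  if h : s < l.length then
    if l.getD s "" = x then some s else replaceSubIndexFrom l x (s + 1)
  else none
termination_by l.length - s

theorem replaceSubIndexFrom_some {l : List String} {x : String} {s j : Nat}
    (h : replaceSubIndexFrom l x s = some j) : s ≤ j ∧ j < l.length := by
  fun_induction replaceSubIndexFrom l x s with
  | case1 s hs heq => simp_all
  | case2 s hs heq ih => have := ih h; omega
  | case3 s hs => simp_all

-- the while loop of B: i = start of pending unmatched chunk, s = search position
def replaceSubGoB (l : List String) (f0 : String) (rest : List String) (r : Int)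
    (i s : Nat) : List String :=
  match hj : replaceSubIndexFrom l f0 s with
  | none => PySem.List.slice l (some (i : Int)) none     -- out.extend(l[i:]); return
  | some j =>
    if PySem.List.slice l (some (j : Int)) (some ((j : Int) + ((f0 :: rest).length : Int))) = f0 :: rest then
      match replaceSubTok r with
      | some t =>
          PySem.List.slice l (some (i : Int)) (some (j : Int)) ++ t ::
            replaceSubGoB l f0 rest r (j + (f0 :: rest).length) (j + (f0 :: rest).length)
      | none => []                      -- IndexError in Python (excluded by Pre_)
    else replaceSubGoB l f0 rest r i (j + 1)
termination_by l.length - s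
decreasing_by
  · have := replaceSubIndexFrom_some hj; simp at this ⊢; omega
  · have := replaceSubIndexFrom_some hj; omega

def replaceSub_alt (l : List String) (f : List String) (r : Int) : List String :=
  match f with
  | [] => []                            -- f[0] raises IndexError (excluded by Pre_)
  | f0 :: rest => replaceSubGoB l f0 rest r 0 0

-- ===== PRECONDITION & SPEC =====
-- Pre_ excludes f = [], where A diverges for nonempty l and B's f[0] raises (for l = [] A
-- happens to return [] but B still raises IndexError), and the inputs where f occurs in l but
-- r is not a valid index of "ABC" (A raises IndexError at the first match, and so does B).
def Pre_replaceSub (l : List String) (f : List String) (r : Int) : Prop :=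
  f ≠ [] ∧ (f <:+: l → -3 ≤ r ∧ r < 3)
instance (l : List String) (f : List String) (r : Int) : Decidable (Pre_replaceSub l f r) := by
  unfold Pre_replaceSub; infer_instance

def pvWitness_replaceSub : List String × List String × Int := (["x", "a", "b", "y", "a", "b"], ["a", "b"], 0)

def Spec_replaceSub (l : List String) (f : List String) (r : Int) (out : List String) : Prop := out = replaceSub_alt l f r
instance (l : List String) (f : List String) (r : Int) (out : List String) : Decidable (Spec_replaceSub l f r out) := by unfold Spec_replaceSub; infer_instance

-- ===== CLAIM (what is proved, stated in full; the proofs are below) =====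
def Claim_equal_replaceSub : Prop := ∀ (l : List String) (f : List String) (r : Int), Dom_replaceSub l f r → Pre_replaceSub l f r → Spec_replaceSub l f r (replaceSub l f r)

-- ===== LEMMAS AND PROOFS =====

-- unfolding lemmas for A's loop
theorem goA_stop {l f : List String} {r : Int} {i : Nat} (h : l.length ≤ i) :
    replaceSubGo l f r i = [] := by
  rw [replaceSubGo]; simp [Nat.not_lt.mpr h]

theorem goA_match {l f : List String} {r : Int} {i : Nat} {t : String}
    (hi : i < l.length) (hm : (l.drop i).take f.length = f) (hf : f ≠ [])
    (ht : replaceSubTok r = some t) :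
    replaceSubGo l f r i = t :: replaceSubGo l f r (i + f.length) := by
  rw [replaceSubGo]
  have h1 : PySem.List.slice l (some (i : Int)) (some ((i : Int) + (f.length : Int))) = f := by
    rw [PySem.List.slice_natCast_add]; exact hm
  have h2 : max f.length 1 = f.length := by
    have : 1 ≤ f.length := List.length_pos_iff.mpr hf
    omega
  simp [hi, h1, ht, h2]

theorem goA_nomatch {l f : List String} {r : Int} {i : Nat}
    (hi : i < l.length) (hm : ¬ (l.drop i).take f.length = f) :
    replaceSubGo l f r i = l.getD i "" :: replaceSubGo l f r (i + 1) := by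
  rw [replaceSubGo]
  have h1 : ¬ PySem.List.slice l (some (i : Int)) (some ((i : Int) + (f.length : Int))) = f := by
    rw [PySem.List.slice_natCast_add]; exact hm
  simp [hi, h1]

-- a match implies f starts with the element there
theorem match_head {l : List String} {f0 : String} {rest : List String} {p : Nat}
    (hm : (l.drop p).take (f0 :: rest).length = f0 :: rest) :
    p < l.length ∧ l.getD p "" = f0 := by
  have hne : l.drop p ≠ [] := by
    intro h; rw [h] at hm; simp at hm
  have hp : p < l.length := by
    by_contra h
    exact hne (List.drop_eq_nil_of_le (by omega))
  refine ⟨hp, ?_⟩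
  rw [List.drop_eq_getElem_cons hp] at hm
  simp only [List.length_cons, List.take_succ_cons] at hm
  rw [List.getD_eq_getElem?_getD, List.getElem?_eq_getElem hp]
  exact (List.cons.injEq .. ▸ hm).1

-- a match yields an infix occurrence
theorem match_infix {l f : List String} {p : Nat}
    (hm : (l.drop p).take f.length = f) : f <:+: l := by
  calc f = (l.drop p).take f.length := hm.symm
    _ <:+: l := ((l.drop p).take_prefix f.length).isInfix.trans (l.drop_suffix p).isInfix

-- indexFrom characterisation
theorem indexFrom_none {l : List String} {x : String} {s : Nat}
    (h : replaceSubIndexFrom l x s = none) :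
    ∀ p, s ≤ p → p < l.length → l.getD p "" ≠ x := by
  fun_induction replaceSubIndexFrom l x s with
  | case1 s hs heq => simp_all
  | case2 s hs heq ih =>
      intro p hsp hpl
      rcases Nat.eq_or_lt_of_le hsp with rfl | h'
      · exact heq
      · exact ih h p h' hpl
  | case3 s hs => intro p hsp hpl _; omega

theorem indexFrom_some {l : List String} {x : String} {s j : Nat}
    (h : replaceSubIndexFrom l x s = some j) :
    l.getD j "" = x ∧ ∀ p, s ≤ p → p < j → l.getD p "" ≠ x := by
  fun_induction replaceSubIndexFrom l x s with
  | case1 s hs heq =>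
      obtain rfl : s = j := by simpa using h
      exact ⟨heq, fun p h1 h2 => absurd h2 (by omega)⟩
  | case2 s hs heq ih =>
      obtain ⟨h1, h2⟩ := ih h
      refine ⟨h1, fun p hsp hpj => ?_⟩
      rcases Nat.eq_or_lt_of_le hsp with rfl | h'
      · exact heq
      · exact h2 p h' hpj
  | case3 s hs => simp_all

-- A walks element-by-element over a matchless region
theorem goA_walk {l f : List String} {r : Int} (i t : Nat) (hit : i ≤ t) (htl : t ≤ l.length)
    (hnm : ∀ p, i ≤ p → p < t → ¬ (l.drop p).take f.length = f) :
    replaceSubGo l f r i = (l.drop i).take (t - i) ++ replaceSubGo l f r t := by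
  rcases Nat.eq_or_lt_of_le hit with rfl | hlt
  · simp
  · have hi : i < l.length := by omega
    rw [goA_nomatch hi (hnm i le_rfl hlt)]
    rw [goA_walk (i+1) t hlt htl (fun p h1 h2 => hnm p (by omega) h2)]
    have hstep : t - i = (t - (i+1)) + 1 := by omega
    rw [List.drop_eq_getElem_cons hi, hstep, List.take_succ_cons]
    simp [List.getD_eq_getElem?_getD, List.getElem?_eq_getElem hi]
termination_by t - i

theorem goA_walk_end {l f : List String} {r : Int} (i : Nat)
    (hnm : ∀ p, i ≤ p → p < l.length → ¬ (l.drop p).take f.length = f) :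
    replaceSubGo l f r i = l.drop i := by
  by_cases hi : i < l.length
  · rw [goA_nomatch hi (hnm i le_rfl hi)]
    rw [goA_walk_end (i+1) (fun p h1 h2 => hnm p (by omega) h2)]
    rw [List.drop_eq_getElem_cons hi]
    simp [List.getD_eq_getElem?_getD, List.getElem?_eq_getElem hi]
  · rw [goA_stop (Nat.le_of_not_lt hi)]
    simp [List.drop_eq_nil_of_le (Nat.le_of_not_lt hi)]
termination_by l.length - i

-- main correspondence: A's cursor sits at the chunk start i, B additionally keeps
-- the search position s; no match starts in [i, s)
theorem goAB {l : List String} {f0 : String} {rest : List String} {r : Int}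
    (hr : (f0 :: rest) <:+: l → -3 ≤ r ∧ r < 3)
    (i s : Nat) (his : i ≤ s)
    (hnm : ∀ p, i ≤ p → p < s → ¬ (l.drop p).take (f0 :: rest).length = (f0 :: rest)) :
    replaceSubGo l (f0 :: rest) r i = replaceSubGoB l f0 rest r i s := by
  rw [replaceSubGoB]
  split
  case h_1 heq =>
    rw [PySem.List.slice_from_natCast]
    refine goA_walk_end i (fun p hip hpl hmat => ?_)
    by_cases hps : p < s
    · exact hnm p hip hps hmat
    · exact indexFrom_none heq p (by omega) hpl (match_head hmat).2
  case h_2 j heq =>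
    obtain ⟨hsj, hjl⟩ := replaceSubIndexFrom_some heq
    obtain ⟨hgj, hnone⟩ := indexFrom_some heq
    rw [PySem.List.slice_natCast_add]
    have hnmj : ∀ p, i ≤ p → p < j → ¬ (l.drop p).take (f0 :: rest).length = (f0 :: rest) := by
      intro p hip hpj hmat
      by_cases hps : p < s
      · exact hnm p hip hps hmat
      · exact hnone p (by omega) hpj (match_head hmat).2
    by_cases hm : (l.drop j).take (f0 :: rest).length = (f0 :: rest)
    · rw [if_pos hm]
      obtain ⟨t, ht⟩ : ∃ t, replaceSubTok r = some t := by
        obtain ⟨h1, h2⟩ := hr (match_infix hm)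
        unfold replaceSubTok
        interval_cases r <;> exact ⟨_, rfl⟩
      simp only [ht]
      rw [goA_walk i j (by omega) (by omega) hnmj, goA_match hjl hm (by simp) ht,
          PySem.List.slice_natCast]
      rw [goAB hr (j + (f0 :: rest).length) (j + (f0 :: rest).length) le_rfl
            (fun p h1 h2 _ => by omega)]
    · rw [if_neg hm]
      refine goAB hr i (j + 1) (by omega) (fun p hip hpj hmat => ?_)
      rcases Nat.lt_or_ge p j with h' | h'
      · exact hnmj p hip h' hmat
      · have : p = j := by omega
        exact hm (this ▸ hmat)
termination_by l.length - s
decreasing_by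
  all_goals simp only [List.length_cons] at *
  all_goals omega

-- ===== VERDICT (by name: the statement is the Claim_ definition above) =====
theorem replaceSub_spec : Claim_equal_replaceSub := by
  intro l f r _hd hpre
  obtain ⟨hf, hr⟩ := hpre
  unfold Spec_replaceSub replaceSub replaceSub_alt
  match f, hf with
  | f0 :: rest, _ => exact goAB hr 0 0 le_rfl (by omega)
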